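-- pv_equiv track=rewrite | github.com/Keamush/python_home_works | OneSoft/baby_names_statistics/tools/most_least.py | make_statistics_by_years
-- ===== SOURCE A (Python) =====
-- from typing import Dict, NamedTuple
--
-- class NameQty(NamedTuple):
--     name: str
--     qty: int
--
-- def make_statistics_by_years(names: Dict[str, str], gender: str):
--     """Make statistics by year and gender"""
--     gender_names = {}
--     for year in names[gender]:
--         top_name_qty = max(names[gender][year].values())
--         top_name = [name for name, qty in names[gender][year].items() if qty == top_name_qty].pop()
--
--         bottom_name_qty = min(names[gender][year].values())
--         bottom_name = [name for name, qty in names[gender][year].items() if qty == bottom_name_qty].pop()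
--
--         gender_names[year] = {
--             'top': NameQty(top_name, top_name_qty),
--             'bottom': NameQty(bottom_name, bottom_name_qty)
--         }
--     return gender_names
-- ===== SOURCE B (Python) =====
-- from typing import Dict, NamedTuple
--
-- class NameQty(NamedTuple):
--     name: str
--     qty: int
--
-- def make_statistics_by_years(names: Dict[str, str], gender: str):
--     """Make statistics by year and gender (single pass per year)."""
--     gender_names = {}
--     for year, counts in names[gender].items():
--         top = bottom = None
--         for name, qty in counts.items():
--             if top is None or qty >= top[1]:
--                 top = (name, qty)
--             if bottom is None or qty <= bottom[1]:
--                 bottom = (name, qty)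
--         if top is None:
--             raise ValueError("empty year dictionary")
--         gender_names[year] = {
--             'top': NameQty(*top),
--             'bottom': NameQty(*bottom)
--         }
--     return gender_names
-- ===== Notes on version B (the rewrite author's own statement) =====
-- stated objective: alternative
-- what changed: Replaces the four passes per year (max over values, a filter-then-pop list for the top name, min over values, another filter-then-pop) by one loop over items() tracking top and bottom with >=/<= so the last tying name wins exactly as .pop() did.
import Mathlib
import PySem

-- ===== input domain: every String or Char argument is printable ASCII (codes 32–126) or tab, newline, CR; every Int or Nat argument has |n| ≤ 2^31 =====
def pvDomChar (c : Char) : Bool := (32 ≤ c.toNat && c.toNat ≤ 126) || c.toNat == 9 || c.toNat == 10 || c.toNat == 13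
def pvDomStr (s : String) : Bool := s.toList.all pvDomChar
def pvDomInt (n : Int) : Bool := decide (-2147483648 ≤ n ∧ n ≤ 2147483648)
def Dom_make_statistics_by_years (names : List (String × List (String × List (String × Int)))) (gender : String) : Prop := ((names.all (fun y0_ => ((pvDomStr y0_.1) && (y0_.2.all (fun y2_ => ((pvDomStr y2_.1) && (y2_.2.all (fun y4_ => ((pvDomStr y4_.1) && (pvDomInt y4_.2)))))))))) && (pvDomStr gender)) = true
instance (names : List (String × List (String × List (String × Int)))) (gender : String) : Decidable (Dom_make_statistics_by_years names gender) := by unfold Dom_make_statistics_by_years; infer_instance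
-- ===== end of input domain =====

-- B replaces A's four passes per year (max, filter+pop, min, filter+pop) by one loop over
-- items() tracking top/bottom with >=/<= so the last tying name wins exactly as .pop() did.

-- ===== PORT A =====
-- max(names[gender][year].values())  (0 only in the unreachable empty case, excluded by Pre_)
def pyMaxVals (counts : List (String × Int)) : Int :=
  match PySem.List.max? (counts.map (fun p => p.2)) (fun v => v) with
  | some v => v
  | none => 0

-- min(names[gender][year].values())
def pyMinVals (counts : List (String × Int)) : Int :=
  match PySem.List.min? (counts.map (fun p => p.2)) (fun v => v) with
  | some v => v
  | none => 0

-- [name for name, qty in … if qty == q].pop()  ("" only in the unreachable empty case)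
def pyLastName (counts : List (String × Int)) (q : Int) : String :=
  match PySem.List.pop? ((counts.filter (fun p => p.2 == q)).map (fun p => p.1)) (-1) with
  | some r => r.1
  | none => ""

-- the per-year body of A: {'top': NameQty(...), 'bottom': NameQty(...)}
def aYearStats (counts : List (String × Int)) : List (String × String × Int) :=
  let tq := pyMaxVals counts
  let tn := pyLastName counts tq
  let bq := pyMinVals counts
  let bn := pyLastName counts bq
  [("top", (tn, tq)), ("bottom", (bn, bq))]

def make_statistics_by_years (names : List (String × List (String × List (String × Int)))) (gender : String) : List (String × List (String × String × Int)) :=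
  match (PySem.Dict.mk names).get? gender with
  | none => []  -- KeyError: excluded by Pre_
  | some years =>
    (years.foldl (fun (d : PySem.Dict String (List (String × String × Int))) yp =>
        d.insert yp.1 (aYearStats yp.2)) PySem.Dict.empty).items

-- ===== PORT B =====
-- the inner single pass of B: top/bottom start as None, last tying item wins
def altYearBest (counts : List (String × Int)) : Option ((String × Int) × (String × Int)) :=
  counts.foldl (fun st p =>
    match st with
    | none => some ((p.1, p.2), (p.1, p.2))
    | some (t, b) =>
        some ((if t.2 ≤ p.2 then (p.1, p.2) else t),
              (if p.2 ≤ b.2 then (p.1, p.2) else b))) none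

def make_statistics_by_years_alt (names : List (String × List (String × List (String × Int)))) (gender : String) : List (String × List (String × String × Int)) :=
  match (PySem.Dict.mk names).get? gender with
  | none => []  -- KeyError: excluded by Pre_
  | some years =>
    (years.foldl (fun (d : PySem.Dict String (List (String × String × Int))) yp =>
        match altYearBest yp.2 with
        | none => d  -- B raises ValueError here: excluded by Pre_
        | some (t, b) => d.insert yp.1 [("top", t), ("bottom", b)]) PySem.Dict.empty).items

-- ===== PRECONDITION & SPEC =====
-- A raises KeyError when gender is not a key of names, and ValueError (max() of an empty
-- sequence) when some per-year dictionary is empty; exactly those inputs are excluded.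
def Pre_make_statistics_by_years (names : List (String × List (String × List (String × Int)))) (gender : String) : Prop :=
  ((PySem.Dict.mk names).get? gender).elim false (fun ys => ys.all (fun p => !p.2.isEmpty)) = true
instance (names : List (String × List (String × List (String × Int)))) (gender : String) : Decidable (Pre_make_statistics_by_years names gender) := by unfold Pre_make_statistics_by_years; infer_instance

def pvWitness_make_statistics_by_years : (List (String × List (String × List (String × Int)))) × String :=
  ([("M", [("1990", [("bob", 3), ("al", 3)]), ("1991", [("cy", 1)])])], "M")

def Spec_make_statistics_by_years (names : List (String × List (String × List (String × Int)))) (gender : String) (out : List (String × List (String × String × Int))) : Prop := out = make_statistics_by_years_alt names gender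
instance (names : List (String × List (String × List (String × Int)))) (gender : String) (out : List (String × List (String × String × Int))) : Decidable (Spec_make_statistics_by_years names gender out) := by unfold Spec_make_statistics_by_years; infer_instance

-- ===== CLAIM (what is proved, stated in full; the proofs are below) =====
def Claim_equal_make_statistics_by_years : Prop := ∀ (names : List (String × List (String × List (String × Int)))) (gender : String), Dom_make_statistics_by_years names gender → Pre_make_statistics_by_years names gender → Spec_make_statistics_by_years names gender (make_statistics_by_years names gender)

-- ===== LEMMAS AND PROOFS =====

theorem maxVals_append (xs : List (String × Int)) (p : String × Int) (h : xs ≠ []) :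
    pyMaxVals (xs ++ [p]) = max (pyMaxVals xs) p.2 := by
  obtain ⟨x, t, rfl⟩ := List.exists_cons_of_ne_nil h
  simp [pyMaxVals, PySem.List.max?_id_cons, List.foldl_append]

theorem minVals_append (xs : List (String × Int)) (p : String × Int) (h : xs ≠ []) :
    pyMinVals (xs ++ [p]) = min (pyMinVals xs) p.2 := by
  obtain ⟨x, t, rfl⟩ := List.exists_cons_of_ne_nil h
  simp [pyMinVals, PySem.List.min?_id_cons, List.foldl_append]

theorem lastName_append_match (xs : List (String × Int)) (p : String × Int) :
    pyLastName (xs ++ [p]) p.2 = p.1 := by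
  simp [pyLastName, List.filter_append, PySem.List.pop?_last]

theorem lastName_append_nomatch (xs : List (String × Int)) (p : String × Int) (q : Int) (h : p.2 ≠ q) :
    pyLastName (xs ++ [p]) q = pyLastName xs q := by
  simp [pyLastName, List.filter_append, h]

theorem topStep (xs : List (String × Int)) (p : String × Int) (hxs : xs ≠ []) :
    (pyLastName (xs ++ [p]) (pyMaxVals (xs ++ [p])), pyMaxVals (xs ++ [p])) =
      if pyMaxVals xs ≤ p.2 then (p.1, p.2) else (pyLastName xs (pyMaxVals xs), pyMaxVals xs) := by
  rw [maxVals_append xs p hxs]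
  by_cases hle : pyMaxVals xs ≤ p.2
  · rw [max_eq_right hle, if_pos hle, lastName_append_match]
  · have hlt : p.2 < pyMaxVals xs := lt_of_not_ge hle
    rw [max_eq_left hlt.le, if_neg hle, lastName_append_nomatch xs p _ (ne_of_lt hlt)]

theorem botStep (xs : List (String × Int)) (p : String × Int) (hxs : xs ≠ []) :
    (pyLastName (xs ++ [p]) (pyMinVals (xs ++ [p])), pyMinVals (xs ++ [p])) =
      if p.2 ≤ pyMinVals xs then (p.1, p.2) else (pyLastName xs (pyMinVals xs), pyMinVals xs) := by
  rw [minVals_append xs p hxs]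
  by_cases hle : p.2 ≤ pyMinVals xs
  · rw [min_eq_right hle, if_pos hle, lastName_append_match]
  · have hlt : pyMinVals xs < p.2 := lt_of_not_ge hle
    rw [min_eq_left hlt.le, if_neg hle, lastName_append_nomatch xs p _ (ne_of_gt hlt)]

-- the per-year equivalence: B's single pass computes A's four passes
theorem yearEq : ∀ (counts : List (String × Int)), counts ≠ [] →
    altYearBest counts =
      some ((pyLastName counts (pyMaxVals counts), pyMaxVals counts),
            (pyLastName counts (pyMinVals counts), pyMinVals counts)) := by
  intro counts
  induction counts using List.reverseRecOn with
  | nil => intro h; exact absurd rfl h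
  | append_singleton xs p ih =>
    intro _
    rcases eq_or_ne xs [] with rfl | hxs
    · have hp : PySem.List.pop? [p.1] (-1) = some (p.1, []) := PySem.List.pop?_last [] p.1
      simp [altYearBest, pyMaxVals, pyMinVals, pyLastName,
        PySem.List.max?_id_cons, PySem.List.min?_id_cons, hp]
    · have hstep : altYearBest (xs ++ [p]) =
          match altYearBest xs with
          | none => some ((p.1, p.2), (p.1, p.2))
          | some (t, b) =>
              some ((if t.2 ≤ p.2 then (p.1, p.2) else t),
                    (if p.2 ≤ b.2 then (p.1, p.2) else b)) := by
        simp [altYearBest, List.foldl_append]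
      rw [hstep, ih hxs]
      simp only [topStep xs p hxs, botStep xs p hxs]

theorem foldEq (years : List (String × List (String × Int)))
    (h : ∀ p ∈ years, p.2 ≠ []) (d : PySem.Dict String (List (String × String × Int))) :
    years.foldl (fun d yp => d.insert yp.1 (aYearStats yp.2)) d =
    years.foldl (fun d yp =>
        match altYearBest yp.2 with
        | none => d
        | some (t, b) => d.insert yp.1 [("top", t), ("bottom", b)]) d := by
  induction years generalizing d with
  | nil => rfl
  | cons y ys ih =>
    have hy : y.2 ≠ [] := h y (List.mem_cons_self ..)
    simp only [List.foldl_cons, yearEq y.2 hy]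
    exact ih (fun p hp => h p (List.mem_cons_of_mem _ hp)) _

-- ===== VERDICT (by name: the statement is the Claim_ definition above) =====
theorem make_statistics_by_years_spec : Claim_equal_make_statistics_by_years := by
  intro names gender _hdom hpre
  unfold Spec_make_statistics_by_years make_statistics_by_years make_statistics_by_years_alt
  unfold Pre_make_statistics_by_years at hpre
  cases hget : (PySem.Dict.mk names).get? gender with
  | none => simp
  | some years =>
    rw [hget] at hpre
    simp only [Option.elim, List.all_eq_true, Bool.not_eq_eq_eq_not] at hpre
    have h : ∀ p ∈ years, p.2 ≠ [] := by
      intro p hp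
      have := hpre p hp
      simpa [List.isEmpty_iff] using this
    simp only [foldEq years h]
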